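-- pv_equiv track=rewrite | github.com/BrightDSA2/DSA2-project | MostFrequentWord/mostFrequentB.py | findMostFrequentFollower
-- ===== SOURCE A (Python) =====
-- from collections import Counter
--
-- def findMostFrequentFollower(inputList: list[str], targetWord: str) -> str:
--     followers = [inputList[i+1] for i in range(len(inputList)-1) if inputList[i] == targetWord]
--     if not followers:
--         return ""
--     counts = Counter(followers)
--     max_freq = max(counts.values())
--     candidates = [w for w, freq in counts.items() if freq == max_freq]
--     # Find the last occurrence among candidates
--     for i in reversed(range(len(inputList)-1)):
--         if inputList[i] == targetWord and inputList[i+1] in candidates: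
--             return inputList[i+1]
--     return ""
-- ===== SOURCE B (Python) =====
-- def findMostFrequentFollower(inputList: list[str], targetWord: str) -> str:
--     # One forward pass: running follower counts plus an online argmax whose
--     # ">=" update naturally implements the latest-last-occurrence tie-break.
--     counts = {}
--     best = ""
--     best_count = 0
--     for prev, cur in zip(inputList, inputList[1:]):
--         if prev == targetWord:
--             c = counts.get(cur, 0) + 1
--             counts[cur] = c
--             if c >= best_count:
--                 best = cur
--                 best_count = c
--     return best
-- ===== Notes on version B (the rewrite author's own statement) =====
-- stated objective: simpler
-- what changed: Replaced the four-phase pipeline (build followers list, Counter, max-frequency candidates list, reverse scan of the input) by a single forward pass keeping running counts and an online argmax whose >= update realises the latest-occurrence tie-break.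
import Mathlib
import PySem

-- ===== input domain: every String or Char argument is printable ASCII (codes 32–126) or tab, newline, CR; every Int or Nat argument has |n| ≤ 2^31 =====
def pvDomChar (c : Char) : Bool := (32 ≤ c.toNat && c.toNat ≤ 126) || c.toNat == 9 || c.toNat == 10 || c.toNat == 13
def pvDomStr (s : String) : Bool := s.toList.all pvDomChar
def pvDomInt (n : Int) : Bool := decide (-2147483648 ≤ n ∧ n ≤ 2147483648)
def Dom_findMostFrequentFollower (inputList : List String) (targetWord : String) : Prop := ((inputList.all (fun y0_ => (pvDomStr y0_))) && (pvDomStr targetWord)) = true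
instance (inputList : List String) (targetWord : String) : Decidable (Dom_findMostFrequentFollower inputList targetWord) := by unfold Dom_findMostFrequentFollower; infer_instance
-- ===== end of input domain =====

-- B replaces A's four-phase pipeline (followers list, Counter, candidates, reverse scan) by one
-- forward pass with running counts and an online ">="-argmax (simpler; same result incl. tie-break).

-- ===== PORT A =====
-- indices i and i+1 from range(len-1) are always in range, so getD is exact there
def findMostFrequentFollower (inputList : List String) (targetWord : String) : String :=
  let followers := (List.range (inputList.length - 1)).filterMap
      (fun i => if inputList.getD i "" = targetWord then some (inputList.getD (i+1) "") else none)
  if followers = [] then ""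
  else
    let counts := PySem.Dict.counter followers
    let maxFreq := (PySem.List.max? (PySem.Dict.values counts) (fun v => v)).getD 0
    let candidates := (PySem.Dict.items counts).filterMap
      (fun p => if p.2 = maxFreq then some p.1 else none)
    match (List.range (inputList.length - 1)).reverse.findSome?
        (fun i => if inputList.getD i "" = targetWord ∧ inputList.getD (i+1) "" ∈ candidates
                  then some (inputList.getD (i+1) "") else none) with
    | some w => w
    | none => ""

-- ===== PORT B =====
def findMostFrequentFollower_alt (inputList : List String) (targetWord : String) : String :=
  let st := (inputList.zip inputList.tail).foldl
    (fun (st : PySem.Dict String Int × String × Int) pr =>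
      if pr.1 = targetWord then
        let c := PySem.Dict.getD st.1 pr.2 0 + 1
        (PySem.Dict.insert st.1 pr.2 c, if c ≥ st.2.2 then (pr.2, c) else st.2)
      else st)
    (PySem.Dict.empty, "", 0)
  st.2.1

-- ===== PRECONDITION & SPEC =====
def Spec_findMostFrequentFollower (inputList : List String) (targetWord : String) (out : String) : Prop := out = findMostFrequentFollower_alt inputList targetWord
instance (inputList : List String) (targetWord : String) (out : String) : Decidable (Spec_findMostFrequentFollower inputList targetWord out) := by unfold Spec_findMostFrequentFollower; infer_instance

-- ===== CLAIM (what is proved, stated in full; the proofs are below) =====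
def Claim_equal_findMostFrequentFollower : Prop := ∀ (inputList : List String) (targetWord : String), Dom_findMostFrequentFollower inputList targetWord → Spec_findMostFrequentFollower inputList targetWord (findMostFrequentFollower inputList targetWord)

-- ===== LEMMAS AND PROOFS =====


-- followers of targetWord, as a filterMap over adjacent pairs
def pvFw (l : List String) (t : String) : List String :=
  (l.zip l.tail).filterMap (fun p => if p.1 = t then some p.2 else none)

-- B's loop body, named for the invariant proof
def pvStep (st : PySem.Dict String Int × String × Int) (w : String) :
    PySem.Dict String Int × String × Int :=
  (PySem.Dict.insert st.1 w (PySem.Dict.getD st.1 w 0 + 1),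
   if PySem.Dict.getD st.1 w 0 + 1 ≥ st.2.2 then (w, PySem.Dict.getD st.1 w 0 + 1) else st.2)

theorem pv_zip_eq_range_map (l : List String) :
    l.zip l.tail = (List.range (l.length - 1)).map (fun i => (l.getD i "", l.getD (i+1) "")) := by
  apply List.ext_getElem
  · simp [List.length_zip]
  · intro i h1 h2
    simp only [List.getElem_zip, List.getElem_map, List.getElem_range]
    have h1' : i < l.length := by simp [List.length_zip] at h1; omega
    have h2' : i + 1 < l.length := by simp [List.length_zip] at h1; omega
    rw [List.getElem_tail]
    simp [List.getD_eq_getElem?_getD, h1', h2']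

theorem pv_findSome_bind {α β γ : Type} (l : List α) (g : α → Option β) (k : β → Option γ) :
    l.findSome? (fun a => (g a).bind k) = (l.filterMap g).findSome? k := by
  induction l with
  | nil => rfl
  | cons x xs ih => cases h : g x <;> simp [List.findSome?_cons, h, ih]

theorem pv_findSome_guard {α : Type} (l : List α) (p : α → Prop) [DecidablePred p] :
    l.findSome? (fun w => if p w then some w else none) = l.find? (fun w => decide (p w)) := by
  induction l with
  | nil => rfl
  | cons x xs ih => by_cases h : p x <;> simp [h, ih]

theorem pv_find_congr {α : Type} (l : List α) (p q : α → Bool) (h : ∀ x ∈ l, p x = q x) :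
    l.find? p = l.find? q := by
  induction l with
  | nil => rfl
  | cons x xs ih =>
    rw [List.find?_cons, List.find?_cons, h x (by simp)]
    cases q x
    · exact ih (fun y hy => h y (by simp [hy]))
    · rfl

theorem pv_filterMap_if_map {α β : Type} (l : List α) (q : α → Prop) [DecidablePred q] (f : α → β) :
    l.filterMap (fun p => if q p then some (f p) else none)
      = (l.filter (fun p => decide (q p))).map f := by
  induction l with
  | nil => rfl
  | cons x xs ih => by_cases h : q x <;> simp [h, ih]

-- B's fold over the zipped pairs is the fold of pvStep over the followers list
theorem pv_B_foldl (l : List String) (t : String) (init : PySem.Dict String Int × String × Int) :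
    (l.zip l.tail).foldl
      (fun (st : PySem.Dict String Int × String × Int) pr =>
        if pr.1 = t then
          (PySem.Dict.insert st.1 pr.2 (PySem.Dict.getD st.1 pr.2 0 + 1),
           if PySem.Dict.getD st.1 pr.2 0 + 1 ≥ st.2.2 then (pr.2, PySem.Dict.getD st.1 pr.2 0 + 1) else st.2)
        else st) init
      = (pvFw l t).foldl pvStep init := by
  rw [PySem.List.foldl_ite_eq_foldl_filter]
  rw [pvFw, pv_filterMap_if_map (l.zip l.tail) (fun p => p.1 = t) (fun p => p.2), List.foldl_map]
  rfl

-- the invariant of B's loop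
theorem pv_B_inv (p : List String) :
    (∀ w, PySem.Dict.getD (p.foldl pvStep (PySem.Dict.empty, "", 0)).1 w 0 = (p.count w : Int)) ∧
    (∀ w ∈ p, (p.count w : Int) ≤ (p.foldl pvStep (PySem.Dict.empty, "", 0)).2.2) ∧
    (p = [] → (p.foldl pvStep (PySem.Dict.empty, "", 0)).2 = ("", 0)) ∧
    (p ≠ [] →
      p.reverse.find? (fun w => decide ((p.count w : Int) = (p.foldl pvStep (PySem.Dict.empty, "", 0)).2.2))
          = some (p.foldl pvStep (PySem.Dict.empty, "", 0)).2.1 ∧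
      (p.count (p.foldl pvStep (PySem.Dict.empty, "", 0)).2.1 : Int)
          = (p.foldl pvStep (PySem.Dict.empty, "", 0)).2.2) := by
  induction p using List.reverseRecOn with
  | nil =>
    exact ⟨fun w => by simp [PySem.Dict.getD_empty], by simp, fun _ => rfl, fun h => absurd rfl h⟩
  | append_singleton q y ih =>
    obtain ⟨ihc, ihb, ihe, ihne⟩ := ih
    rw [List.foldl_concat]
    set st := q.foldl pvStep (PySem.Dict.empty, "", 0) with hst
    have hcy : ((q ++ [y]).count y : Int) = (q.count y : Int) + 1 := by
      simp [List.count_append]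
    have hcne : ∀ w, w ≠ y → (q ++ [y]).count w = q.count w := by
      intro w hw
      simp [List.count_append, Ne.symm hw]
    have hgd : PySem.Dict.getD st.1 y 0 + 1 = ((q ++ [y]).count y : Int) := by
      rw [ihc y, hcy]
    have hc1 : ∀ w, PySem.Dict.getD (pvStep st y).1 w 0 = ((q ++ [y]).count w : Int) := by
      intro w
      simp only [pvStep, PySem.Dict.getD_insert]
      by_cases hw : w = y
      · subst hw; rw [if_pos rfl]; exact hgd
      · rw [if_neg hw, ihc w, hcne w hw]
    refine ⟨hc1, ?_, fun h => absurd h (by simp), fun _ => ?_⟩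
    all_goals by_cases hcase : PySem.Dict.getD st.1 y 0 + 1 ≥ st.2.2
    -- bound, update case
    · intro w hw
      have h2 : (pvStep st y).2 = (y, PySem.Dict.getD st.1 y 0 + 1) := by
        simp only [pvStep, if_pos hcase]
      rw [h2]
      by_cases hwy : w = y
      · subst hwy; rw [← hgd]
      · have hwq : w ∈ q := by
          rcases List.mem_append.mp hw with h | h
          · exact h
          · simp at h; exact absurd h hwy
        rw [hcne w hwy]
        exact le_trans (ihb w hwq) hcase
    -- bound, no-update case
    · intro w hw
      have h2 : (pvStep st y).2 = st.2 := by
        simp only [pvStep, if_neg hcase]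
      rw [h2]
      by_cases hwy : w = y
      · subst hwy; rw [← hgd]; omega
      · have hwq : w ∈ q := by
          rcases List.mem_append.mp hw with h | h
          · exact h
          · simp at h; exact absurd h hwy
        rw [hcne w hwy]
        exact ihb w hwq
    -- find?, update case
    · have h2 : (pvStep st y).2 = (y, PySem.Dict.getD st.1 y 0 + 1) := by
        simp only [pvStep, if_pos hcase]
      rw [h2, List.reverse_append]
      simp only [List.reverse_cons, List.reverse_nil, List.nil_append, List.cons_append,
        List.find?_cons]
      rw [show (decide (((q ++ [y]).count y : Int) = PySem.Dict.getD st.1 y 0 + 1)) = true by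
        rw [← hgd]; simp]
      exact ⟨rfl, hgd.symm⟩
    -- find?, no-update case
    · have h2 : (pvStep st y).2 = st.2 := by
        simp only [pvStep, if_neg hcase]
      have hq : q ≠ [] := by
        intro hq0
        apply hcase
        have : st.2 = ("", 0) := ihe hq0
        rw [this, ihc y, hq0]
        simp
      obtain ⟨hfind, hcnt⟩ := ihne hq
      have hlt : (q.count y : Int) + 1 < st.2.2 := by
        rw [← ihc y]; omega
      rw [h2, List.reverse_append]
      simp only [List.reverse_cons, List.reverse_nil, List.nil_append, List.cons_append,
        List.find?_cons]
      rw [show (decide (((q ++ [y]).count y : Int) = st.2.2)) = false by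
        rw [hcy]; simp; omega]
      have hcongr : q.reverse.find? (fun w => decide (((q ++ [y]).count w : Int) = st.2.2))
          = q.reverse.find? (fun w => decide ((q.count w : Int) = st.2.2)) := by
        apply pv_find_congr
        intro x hx
        by_cases hxy : x = y
        · subst hxy
          rw [hcy]
          simp only [decide_eq_decide]
          omega
        · rw [hcne x hxy]
      rw [hcongr, hfind]
      refine ⟨rfl, ?_⟩
      have hne : st.2.1 ≠ y := by
        intro h
        rw [h] at hcnt
        omega
      rw [hcne _ hne, hcnt]


-- A's candidates list, made explicit
theorem pv_candidates (fwl : List String) (M : Int) :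
    (PySem.Dict.items (PySem.Dict.counter fwl)).filterMap
        (fun p => if p.2 = M then some p.1 else none)
      = (PySem.Set.ofList fwl).filterMap (fun k => if (fwl.count k : Int) = M then some k else none) := by
  rw [PySem.Dict.items_counter, List.filterMap_map]
  rfl

theorem pv_A_eq (l : List String) (t : String) :
    findMostFrequentFollower l t
      = if pvFw l t = [] then ""
        else
          match (pvFw l t).reverse.find?
              (fun w => decide (w ∈ pvFw l t ∧ ((pvFw l t).count w : Int)
                = (PySem.List.max? (PySem.Dict.values (PySem.Dict.counter (pvFw l t)))
                    (fun v => v)).getD 0)) with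
          | some w => w
          | none => "" := by
  have hf : (List.range (l.length - 1)).filterMap
      (fun i => if l.getD i "" = t then some (l.getD (i+1) "") else none) = pvFw l t := by
    rw [pvFw, pv_zip_eq_range_map, List.filterMap_map]; rfl
  simp only [findMostFrequentFollower, hf]
  by_cases h : pvFw l t = []
  · simp [h]
  · rw [if_neg h, if_neg h]
    have hb : (fun i => if l.getD i "" = t ∧ l.getD (i+1) ""
          ∈ (PySem.Dict.items (PySem.Dict.counter (pvFw l t))).filterMap
              (fun p => if p.2 = (PySem.List.max? (PySem.Dict.values (PySem.Dict.counter (pvFw l t)))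
                  (fun v => v)).getD 0 then some p.1 else none)
        then some (l.getD (i+1) "") else none)
        = fun i => ((if l.getD i "" = t then some (l.getD (i+1) "") else none).bind
            (fun w => if w ∈ (PySem.Dict.items (PySem.Dict.counter (pvFw l t))).filterMap
              (fun p => if p.2 = (PySem.List.max? (PySem.Dict.values (PySem.Dict.counter (pvFw l t)))
                  (fun v => v)).getD 0 then some p.1 else none) then some w else none)) := by
      funext i
      by_cases h1 : l.getD i "" = t
      · by_cases h2 : l.getD (i+1) "" ∈ (PySem.Dict.items (PySem.Dict.counter (pvFw l t))).filterMap
            (fun p => if p.2 = (PySem.List.max? (PySem.Dict.values (PySem.Dict.counter (pvFw l t)))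
                (fun v => v)).getD 0 then some p.1 else none)
        · rw [if_pos h1]
          rw [Option.bind_some]
          rw [if_pos h2, if_pos ⟨h1, h2⟩]
        · rw [if_pos h1]
          rw [Option.bind_some]
          rw [if_neg h2, if_neg (fun hc => h2 hc.2)]
      · rw [if_neg h1, if_neg (fun hc => h1 hc.1)]
        rfl
    rw [hb, pv_findSome_bind, List.filterMap_reverse, hf, pv_findSome_guard]
    have := pv_find_congr ((pvFw l t).reverse)
      (fun w => decide (w ∈ (PySem.Dict.items (PySem.Dict.counter (pvFw l t))).filterMap
          (fun p => if p.2 = (PySem.List.max? (PySem.Dict.values (PySem.Dict.counter (pvFw l t)))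
              (fun v => v)).getD 0 then some p.1 else none)))
      (fun w => decide (w ∈ pvFw l t ∧ ((pvFw l t).count w : Int)
          = (PySem.List.max? (PySem.Dict.values (PySem.Dict.counter (pvFw l t)))
              (fun v => v)).getD 0))
      (by
        intro x hx
        simp only [decide_eq_decide]
        rw [pv_candidates]
        constructor
        · intro hmem
          obtain ⟨a, ha, hae⟩ := List.mem_filterMap.mp hmem
          by_cases hca : ((pvFw l t).count a : Int)
              = (PySem.List.max? (PySem.Dict.values (PySem.Dict.counter (pvFw l t)))
                  (fun v => v)).getD 0
          · rw [if_pos hca] at hae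
            obtain rfl := Option.some.inj hae
            exact ⟨(PySem.Set.mem_ofList _ _).mp ha, hca⟩
          · rw [if_neg hca] at hae
            cases hae
        · rintro ⟨hmem, hcx⟩
          exact List.mem_filterMap.mpr ⟨x, (PySem.Set.mem_ofList _ _).mpr hmem, by rw [if_pos hcx]⟩)
    rw [this]

-- ===== VERDICT (by name: the statement is the Claim_ definition above) =====
theorem findMostFrequentFollower_spec : Claim_equal_findMostFrequentFollower := by
  intro l t _
  unfold Spec_findMostFrequentFollower
  simp only [findMostFrequentFollower_alt]
  rw [pv_B_foldl, pv_A_eq]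
  by_cases h : pvFw l t = []
  · rw [if_pos h, h]; rfl
  · rw [if_neg h]
    obtain ⟨hc, hbnd, _, hne⟩ := pv_B_inv (pvFw l t)
    obtain ⟨hfind, hcnt⟩ := hne h
    have hval : PySem.Dict.values (PySem.Dict.counter (pvFw l t))
        = (PySem.Set.ofList (pvFw l t)).map (fun k => ((pvFw l t).count k : Int)) := by
      simp only [PySem.Dict.values, PySem.Dict.items_counter, List.map_map]; rfl
    have hbestmem : (( pvFw l t).foldl pvStep (PySem.Dict.empty, "", 0)).2.1 ∈ pvFw l t :=
      List.mem_reverse.mp (List.mem_of_find?_eq_some hfind)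
    have hM : (PySem.List.max? (PySem.Dict.values (PySem.Dict.counter (pvFw l t)))
        (fun v => v)).getD 0 = ((pvFw l t).foldl pvStep (PySem.Dict.empty, "", 0)).2.2 := by
      cases hm : PySem.List.max? (PySem.Dict.values (PySem.Dict.counter (pvFw l t))) (fun v => v) with
      | none =>
        rw [PySem.List.max?_eq_none_iff, hval, List.map_eq_nil_iff] at hm
        obtain ⟨x, hx⟩ := List.exists_mem_of_ne_nil _ h
        exact absurd (hm ▸ (PySem.Set.mem_ofList _ _).mpr hx) (List.not_mem_nil)
      | some m =>
        have hmem := PySem.List.max?_mem hm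
        rw [hval] at hmem
        obtain ⟨k, hk, hkm⟩ := List.mem_map.mp hmem
        have hk' : k ∈ pvFw l t := (PySem.Set.mem_ofList _ _).mp hk
        have h1 : m ≤ ((pvFw l t).foldl pvStep (PySem.Dict.empty, "", 0)).2.2 :=
          hkm ▸ hbnd k hk'
        have h2 : ((pvFw l t).foldl pvStep (PySem.Dict.empty, "", 0)).2.2 ≤ m := by
          have hv : (((pvFw l t).count (((pvFw l t).foldl pvStep (PySem.Dict.empty, "", 0)).2.1) : Int))
              ∈ PySem.Dict.values (PySem.Dict.counter (pvFw l t)) := by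
            rw [hval]
            exact List.mem_map.mpr ⟨_, (PySem.Set.mem_ofList _ _).mpr hbestmem, rfl⟩
          have := PySem.List.max?_isMax hm _ hv
          omega
        simp
        omega
    rw [hM]
    have := pv_find_congr ((pvFw l t).reverse)
      (fun w => decide (w ∈ pvFw l t ∧ ((pvFw l t).count w : Int)
          = ((pvFw l t).foldl pvStep (PySem.Dict.empty, "", 0)).2.2))
      (fun w => decide (((pvFw l t).count w : Int)
          = ((pvFw l t).foldl pvStep (PySem.Dict.empty, "", 0)).2.2))
      (by
        intro x hx
        simp only [decide_eq_decide]
        have : x ∈ pvFw l t := List.mem_reverse.mp hx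
        tauto)
    rw [this, hfind]
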